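-- pv_equiv track=rewrite | github.com/kimgyeongmin5348/Contest_Ai | contest/ex_01_20_2020182006.py | build_tsp_sequence
-- ===== SOURCE A (Python) =====
-- from collections import defaultdict
--
-- def build_tsp_sequence(mst, start):
--     mst_graph = defaultdict(list)
--     for u, v, w in mst:
--         mst_graph[u].append(v)
--         mst_graph[v].append(u)
--
--     def dfs(node, visited, sequence):
--         visited.add(node)
--         sequence.append(node)
--         for neighbor in mst_graph[node]:
--             if neighbor not in visited:
--                 dfs(neighbor, visited, sequence)
--
--     visited = set()
--     sequence = []
--     dfs(start, visited, sequence)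
--     return sequence
-- ===== SOURCE B (Python) =====
-- from collections import defaultdict
--
-- def build_tsp_sequence(mst, start):
--     graph = defaultdict(list)
--     for u, v, w in mst:
--         graph[u].append(v)
--         graph[v].append(u)
--     visited = set()
--     sequence = []
--     stack = [start]
--     while stack:
--         node = stack.pop()
--         if node in visited:
--             continue
--         visited.add(node)
--         sequence.append(node)
--         stack.extend(reversed(graph[node]))
--     return sequence
-- ===== Notes on version B (the rewrite author's own statement) =====
-- stated objective: alternative
-- what changed: Replaces the recursive DFS helper by an iterative explicit-stack traversal (pop a node, skip if visited, otherwise record it and push its neighbors in reversed order), keeping the same adjacency-list construction and producing the identical preorder sequence.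
import Mathlib
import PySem

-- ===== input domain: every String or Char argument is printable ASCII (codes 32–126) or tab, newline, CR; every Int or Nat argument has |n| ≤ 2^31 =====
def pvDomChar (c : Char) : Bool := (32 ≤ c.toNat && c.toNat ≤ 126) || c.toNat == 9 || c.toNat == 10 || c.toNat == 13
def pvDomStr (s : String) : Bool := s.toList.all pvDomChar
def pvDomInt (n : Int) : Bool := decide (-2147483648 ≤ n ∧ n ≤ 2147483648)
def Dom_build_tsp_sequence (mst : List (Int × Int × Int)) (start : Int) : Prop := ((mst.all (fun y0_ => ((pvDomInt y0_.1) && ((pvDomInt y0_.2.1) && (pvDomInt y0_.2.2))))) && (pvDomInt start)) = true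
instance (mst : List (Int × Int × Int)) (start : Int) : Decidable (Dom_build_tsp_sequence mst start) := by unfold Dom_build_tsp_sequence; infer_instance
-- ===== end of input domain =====

-- B replaces A's recursive DFS by an explicit-stack iterative DFS (same adjacency build, same preorder output); objective: alternative decomposition, no speed claim.

-- Shared helper: both Pythons build the adjacency dict with the identical loop
-- (mst_graph[u].append(v); mst_graph[v].append(u) on a defaultdict(list)).
def pvBuildGraph (mst : List (Int × Int × Int)) : PySem.Dict Int (List Int) :=
  mst.foldl (fun d e =>
    (d.modify e.1 [] (fun l => l ++ [e.2.1])).modify e.2.1 [] (fun l => l ++ [e.1]))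
    PySem.Dict.empty

-- Number of elements of U not yet visited (termination measure helper; duplicates in U are harmless).
def pvUnvis (U vis : List Int) : Nat := (U.filter (fun x => decide (x ∉ vis))).length

-- Lemmas cited by pvStackB's decreasing_by (they must precede the port).
theorem pvUnvis_cons (a : Int) (t vis : List Int) :
    pvUnvis (a :: t) vis = (if a ∈ vis then 0 else 1) + pvUnvis t vis := by
  simp only [pvUnvis, List.filter_cons]
  by_cases h : a ∈ vis
  · simp [h]
  · simp [h]
    omega

theorem pvUnvis_le (U vis vis' : List Int) (h : ∀ x, x ∈ vis → x ∈ vis') :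
    pvUnvis U vis' ≤ pvUnvis U vis := by
  induction U with
  | nil => simp [pvUnvis]
  | cons a t ih =>
    rw [pvUnvis_cons, pvUnvis_cons]
    by_cases ha' : a ∈ vis'
    · by_cases ha : a ∈ vis <;> simp [ha, ha'] <;> omega
    · have ha : a ∉ vis := fun hm => ha' (h a hm)
      simp [ha, ha']
      omega

theorem pvUnvis_lt (U vis vis' : List Int) (h : ∀ x, x ∈ vis → x ∈ vis')
    (n : Int) (hU : n ∈ U) (hv : n ∉ vis) (hv' : n ∈ vis') :
    pvUnvis U vis' < pvUnvis U vis := by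
  induction U with
  | nil => cases hU
  | cons a t ih =>
    rw [pvUnvis_cons, pvUnvis_cons]
    rcases List.mem_cons.mp hU with rfl | hU
    · have := pvUnvis_le t vis vis' h
      simp [hv, hv']
      omega
    · have htl := ih hU
      by_cases ha' : a ∈ vis'
      · by_cases ha : a ∈ vis <;> simp [ha, ha'] <;> omega
      · have ha : a ∉ vis := fun hm => ha' (h a hm)
        simp [ha, ha']
        omega

theorem pvDeg_le (g : PySem.Dict Int (List Int)) (n : Int) :
    (g.getD n []).length ≤ ((g.values.map List.length).sum) := by
  rw [PySem.Dict.getD_eq_get?_getD]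
  cases e : g.get? n with
  | none => simp
  | some v =>
    have hm := PySem.Dict.mem_items_of_get?_eq_some g e
    have : v.length ∈ g.values.map List.length := by
      simp only [PySem.Dict.values, List.map_map]
      exact List.mem_map.mpr ⟨(n, v), hm, rfl⟩
    simpa using List.single_le_sum (fun x _ => Nat.zero_le x) _ this

theorem pvGetD_nil_of_not_mem_keys (g : PySem.Dict Int (List Int)) (n : Int)
    (h : n ∉ g.keys) : g.getD n [] = [] := by
  apply PySem.Dict.getD_of_not_contains
  rw [PySem.Dict.contains_eq_decide_mem_keys]
  simpa using h

-- ===== PORT A =====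
-- A's recursive dfs, with fuel making the nested recursion structural; the fuel
-- chosen at the top level provably suffices (it bounds the recursion depth).
mutual
def pvDfsA (g : PySem.Dict Int (List Int)) : Nat → Int → List Int → List Int → (List Int × List Int)
  | 0, _, vis, seq => (vis, seq)
  | f + 1, n, vis, seq => pvDfsListA g f (g.getD n []) (PySem.Set.add vis n) (seq ++ [n])
termination_by f _ _ _ => (f, 0)
def pvDfsListA (g : PySem.Dict Int (List Int)) : Nat → List Int → List Int → List Int → (List Int × List Int)
  | _, [], vis, seq => (vis, seq)
  | f, nb :: t, vis, seq =>
    if nb ∈ vis then pvDfsListA g f t vis seq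
    else
      let st := pvDfsA g f nb vis seq
      pvDfsListA g f t st.1 st.2
termination_by f l _ _ => (f, l.length + 1)
end

def build_tsp_sequence (mst : List (Int × Int × Int)) (start : Int) : List Int :=
  let g := pvBuildGraph mst
  (pvDfsA g (g.keys.length + 2) start PySem.Set.empty []).2

-- ===== PORT B =====
-- B's while-loop over an explicit stack; the Python stack has its top at the END
-- and pushes reversed(graph[node]), which as a head-top list is g[node] ++ stack.
def pvStackB (g : PySem.Dict Int (List Int)) : List Int → List Int → List Int → List Int
  | [], _, seq => seq
  | n :: st, vis, seq =>
    if n ∈ vis then pvStackB g st vis seq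
    else pvStackB g (g.getD n [] ++ st) (PySem.Set.add vis n) (seq ++ [n])
termination_by stack vis _ => pvUnvis g.keys vis * ((g.values.map List.length).sum + 1) + stack.length
decreasing_by
  · simp only [List.length_cons]; omega
  · rename_i hnv
    by_cases hk : n ∈ g.keys
    · have h1 : pvUnvis g.keys (PySem.Set.add vis n) < pvUnvis g.keys vis := by
        apply pvUnvis_lt g.keys vis _ (fun x hx => (PySem.Set.mem_add vis n x).mpr (Or.inl hx)) n hk hnv
        exact (PySem.Set.mem_add vis n n).mpr (Or.inr rfl)
      have h2 := pvDeg_le g n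
      have h3 : (pvUnvis g.keys (PySem.Set.add vis n) + 1) * ((g.values.map List.length).sum + 1)
          ≤ pvUnvis g.keys vis * ((g.values.map List.length).sum + 1) :=
        Nat.mul_le_mul_right _ h1
      rw [Nat.add_mul, Nat.one_mul] at h3
      simp only [List.length_append, List.length_cons]
      linarith
    · have h0 : g.getD n [] = [] := pvGetD_nil_of_not_mem_keys g n hk
      have h1 : pvUnvis g.keys (PySem.Set.add vis n) ≤ pvUnvis g.keys vis :=
        pvUnvis_le g.keys vis _ (fun x hx => (PySem.Set.mem_add vis n x).mpr (Or.inl hx))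
      have h3 : pvUnvis g.keys (PySem.Set.add vis n) * ((g.values.map List.length).sum + 1)
          ≤ pvUnvis g.keys vis * ((g.values.map List.length).sum + 1) :=
        Nat.mul_le_mul_right _ h1
      simp only [h0, List.nil_append, List.length_cons]
      linarith

def build_tsp_sequence_alt (mst : List (Int × Int × Int)) (start : Int) : List Int :=
  let g := pvBuildGraph mst
  pvStackB g [start] PySem.Set.empty []

-- ===== PRECONDITION & SPEC =====
def Spec_build_tsp_sequence (mst : List (Int × Int × Int)) (start : Int) (out : List Int) : Prop := out = build_tsp_sequence_alt mst start
instance (mst : List (Int × Int × Int)) (start : Int) (out : List Int) : Decidable (Spec_build_tsp_sequence mst start out) := by unfold Spec_build_tsp_sequence; infer_instance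

-- ===== CLAIM (what is proved, stated in full; the proofs are below) =====
def Claim_equal_build_tsp_sequence : Prop := ∀ (mst : List (Int × Int × Int)) (start : Int), Dom_build_tsp_sequence mst start → Spec_build_tsp_sequence mst start (build_tsp_sequence mst start)

-- ===== LEMMAS AND PROOFS =====

-- One build step preserves "every stored neighbour is a key".
theorem pvStep_closed (d : PySem.Dict Int (List Int)) (e : Int × Int × Int)
    (hd : ∀ x y, y ∈ d.getD x [] → y ∈ d.keys) :
    ∀ x y, y ∈ ((d.modify e.1 [] (fun l => l ++ [e.2.1])).modify e.2.1 []
        (fun l => l ++ [e.1])).getD x [] →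
      y ∈ ((d.modify e.1 [] (fun l => l ++ [e.2.1])).modify e.2.1 []
        (fun l => l ++ [e.1])).keys := by
  intro x y hy
  have hmem : ∀ z : Int, z = e.2.1 ∨ z = e.1 ∨ z ∈ d.keys →
      z ∈ ((d.modify e.1 [] (fun l => l ++ [e.2.1])).modify e.2.1 []
        (fun l => l ++ [e.1])).keys := by
    intro z hz
    rw [PySem.Dict.keys_modify, PySem.Dict.mem_keys_insert,
      PySem.Dict.keys_modify, PySem.Dict.mem_keys_insert]
    tauto
  simp only [PySem.Dict.getD_modify] at hy
  apply hmem
  have ha := hd e.1 y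
  have hb := hd e.2.1 y
  have hc := hd x y
  split_ifs at hy <;> (try simp only [List.mem_append, List.mem_singleton] at hy) <;> tauto

-- Every neighbour stored in the built graph is itself a key of the graph.
theorem pvBuildGraph_closed (mst : List (Int × Int × Int)) :
    ∀ x y, y ∈ (pvBuildGraph mst).getD x [] → y ∈ (pvBuildGraph mst).keys := by
  unfold pvBuildGraph
  suffices h : ∀ (d : PySem.Dict Int (List Int)),
      (∀ x y, y ∈ d.getD x [] → y ∈ d.keys) →
      ∀ x y, y ∈ (mst.foldl (fun d e =>
          (d.modify e.1 [] (fun l => l ++ [e.2.1])).modify e.2.1 []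
            (fun l => l ++ [e.1])) d).getD x [] →
        y ∈ (mst.foldl (fun d e =>
          (d.modify e.1 [] (fun l => l ++ [e.2.1])).modify e.2.1 []
            (fun l => l ++ [e.1])) d).keys by
    exact h PySem.Dict.empty (by simp)
  induction mst with
  | nil => intro d hd; exact hd
  | cons e t ih =>
    intro d hd
    exact ih _ (pvStep_closed d e hd)

-- visited only grows through the recursive DFS.
theorem pvDfs_mono (g : PySem.Dict Int (List Int)) (f : Nat) :
    (∀ n vis seq x, x ∈ vis → x ∈ (pvDfsA g f n vis seq).1) ∧
    (∀ l vis seq x, x ∈ vis → x ∈ (pvDfsListA g f l vis seq).1) := by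
  induction f with
  | zero =>
    constructor
    · intro n vis seq x hx
      simpa [pvDfsA] using hx
    · intro l
      induction l with
      | nil => intro vis seq x hx; simpa [pvDfsListA] using hx
      | cons nb t ih =>
        intro vis seq x hx
        rw [pvDfsListA]
        by_cases h : nb ∈ vis
        · simpa [h] using ih vis seq x hx
        · simpa [h, pvDfsA] using ih vis seq x hx
  | succ f ihf =>
    have hA : ∀ n vis seq x, x ∈ vis → x ∈ (pvDfsA g (f + 1) n vis seq).1 := by
      intro n vis seq x hx
      rw [pvDfsA]
      exact ihf.2 _ _ _ x ((PySem.Set.mem_add vis n x).mpr (Or.inl hx))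
    refine ⟨hA, ?_⟩
    intro l
    induction l with
    | nil => intro vis seq x hx; simpa [pvDfsListA] using hx
    | cons nb t ih =>
      intro vis seq x hx
      rw [pvDfsListA]
      by_cases h : nb ∈ vis
      · simpa [h] using ih vis seq x hx
      · simp only [h, if_false]
        exact ih _ _ x (hA nb vis seq x hx)

-- Main bridge: running the stack machine on l ++ rest equals first doing the
-- recursive DFS over l (with sufficient fuel), then continuing with rest.
theorem pvMain (g : PySem.Dict Int (List Int)) (start : Int)
    (hg : ∀ x y, y ∈ g.getD x [] → y ∈ g.keys) :
    ∀ k l vis seq rest f,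
      pvUnvis (start :: g.keys) vis ≤ k →
      (∀ nb ∈ l, nb ∈ start :: g.keys) →
      1 + pvUnvis (start :: g.keys) vis ≤ f →
      pvStackB g (l ++ rest) vis seq =
        pvStackB g rest (pvDfsListA g f l vis seq).1 (pvDfsListA g f l vis seq).2 := by
  intro k
  induction k using Nat.strong_induction_on with
  | _ k ihk =>
    intro l
    induction l with
    | nil =>
      intro vis seq rest f hk hl hf
      simp [pvDfsListA]
    | cons nb t iht =>
      intro vis seq rest f hk hl hf
      cases f with
      | zero => exact absurd hf (by omega)
      | succ f' =>
        rw [List.cons_append, pvStackB, pvDfsListA]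
        by_cases h : nb ∈ vis
        · simp only [h, if_true]
          exact iht vis seq rest (f' + 1) hk (fun x hx => hl x (List.mem_cons_of_mem _ hx)) hf
        · simp only [h, if_false]
          have hnbU : nb ∈ start :: g.keys := hl nb List.mem_cons_self
          have hsub : ∀ x, x ∈ vis → x ∈ PySem.Set.add vis nb :=
            fun x hx => (PySem.Set.mem_add vis nb x).mpr (Or.inl hx)
          have hlt : pvUnvis (start :: g.keys) (PySem.Set.add vis nb) < pvUnvis (start :: g.keys) vis :=
            pvUnvis_lt _ _ _ hsub nb hnbU h ((PySem.Set.mem_add vis nb nb).mpr (Or.inr rfl))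
          have hkey : ∀ x ∈ g.getD nb [], x ∈ start :: g.keys :=
            fun x hx => List.mem_cons_of_mem _ (hg nb x hx)
          have h1 := ihk (pvUnvis (start :: g.keys) (PySem.Set.add vis nb)) (by omega)
            (g.getD nb []) (PySem.Set.add vis nb) (seq ++ [nb]) (t ++ rest) f'
            le_rfl hkey (by omega)
          rw [h1]
          have hmono : ∀ x, x ∈ vis → x ∈ (pvDfsA g (f' + 1) nb vis seq).1 :=
            fun x hx => (pvDfs_mono g (f' + 1)).1 nb vis seq x hx
          have hle : pvUnvis (start :: g.keys) (pvDfsA g (f' + 1) nb vis seq).1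
              ≤ pvUnvis (start :: g.keys) vis := pvUnvis_le _ _ _ hmono
          have h2 := iht (pvDfsA g (f' + 1) nb vis seq).1 (pvDfsA g (f' + 1) nb vis seq).2
            rest (f' + 1) (by omega) (fun x hx => hl x (List.mem_cons_of_mem _ hx)) (by omega)
          have he : pvDfsA g (f' + 1) nb vis seq
              = pvDfsListA g f' (g.getD nb []) (PySem.Set.add vis nb) (seq ++ [nb]) := by
            rw [pvDfsA]
          rw [he] at h2 ⊢
          exact h2

-- ===== VERDICT (by name: the statement is the Claim_ definition above) =====
theorem build_tsp_sequence_spec : Claim_equal_build_tsp_sequence := by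
  intro mst start _
  show build_tsp_sequence mst start = build_tsp_sequence_alt mst start
  have hg := pvBuildGraph_closed mst
  show (pvDfsA (pvBuildGraph mst) ((pvBuildGraph mst).keys.length + 2) start [] []).2
      = pvStackB (pvBuildGraph mst) [start] [] []
  have hcnt : pvUnvis (start :: (pvBuildGraph mst).keys) [] = (pvBuildGraph mst).keys.length + 1 := by
    simp [pvUnvis]
  have hmain := pvMain (pvBuildGraph mst) start hg
    (pvUnvis (start :: (pvBuildGraph mst).keys) []) [start] [] [] []
    ((pvBuildGraph mst).keys.length + 2) le_rfl
    (fun nb hnb => by simp at hnb; simp [hnb]) (by omega)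
  have e1 : ([start] : List Int) ++ [] = [start] := by simp
  rw [e1] at hmain
  rw [hmain, pvStackB]
  simp [pvDfsListA]
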